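-- pv_equiv track=rewrite | github.com/heenashree/AlgorithmsAndDataStructs | Python Codes/XML-YAML/EstimateAmountOfSubsets.py | est_subsets
-- ===== SOURCE A (Python) =====
-- def est_subsets(arr):
--     count =0
--     arr = set(arr)
--     import itertools
--     for i in range(1,len(arr)+1):
--         x = set(itertools.combinations(arr, i))
--         count = count + len(x)
--     return count
-- ===== SOURCE B (Python) =====
-- def est_subsets(arr):
--     # number of non-empty subsets of the distinct elements: 2^k - 1
--     return 2 ** len(set(arr)) - 1
-- ===== Notes on version B (the rewrite author's own statement) =====
-- stated objective: faster
-- what changed: replaces the enumeration of all combinations of every size with the closed form 2^(number of distinct elements) - 1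
import Mathlib
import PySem

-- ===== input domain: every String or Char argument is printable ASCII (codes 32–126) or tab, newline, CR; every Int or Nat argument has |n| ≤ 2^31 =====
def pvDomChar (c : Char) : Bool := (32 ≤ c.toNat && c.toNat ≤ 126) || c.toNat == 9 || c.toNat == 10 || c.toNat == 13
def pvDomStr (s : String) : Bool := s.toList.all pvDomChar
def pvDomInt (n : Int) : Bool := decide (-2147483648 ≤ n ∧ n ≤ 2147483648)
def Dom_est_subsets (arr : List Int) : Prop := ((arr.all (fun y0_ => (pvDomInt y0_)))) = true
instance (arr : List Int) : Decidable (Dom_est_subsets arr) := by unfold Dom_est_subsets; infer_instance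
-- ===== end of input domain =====

-- B replaces A's enumeration of all combinations of every size by the closed form 2^(distinct count) - 1 (objective: faster).

-- ===== PORT A =====
-- itertools.combinations(xs, n) in itertools order (elements drawn from the distinct list xs)
def combos : List Int → Nat → List (List Int)
  | _, 0 => [[]]
  | [], _ + 1 => []
  | x :: xs, n + 1 => ((combos xs n).map (fun c => x :: c)) ++ combos xs (n + 1)

def est_subsets (arr : List Int) : Int :=
  (PySem.List.pyRange 1 (((PySem.Set.ofList arr).length : Int) + 1) 1).foldl
    (fun count i =>
      count + ((PySem.Set.ofList (combos (PySem.Set.ofList arr) i.toNat)).length : Int)) 0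

-- ===== PORT B =====
def est_subsets_alt (arr : List Int) : Int :=
  2 ^ (PySem.Set.ofList arr).length - 1

-- ===== PRECONDITION & SPEC =====
def Spec_est_subsets (arr : List Int) (out : Int) : Prop := out = est_subsets_alt arr
instance (arr : List Int) (out : Int) : Decidable (Spec_est_subsets arr out) := by unfold Spec_est_subsets; infer_instance

-- ===== CLAIM (what is proved, stated in full; the proofs are below) =====
def Claim_equal_est_subsets : Prop := ∀ (arr : List Int), Dom_est_subsets arr → Spec_est_subsets arr (est_subsets arr)

-- ===== LEMMAS AND PROOFS =====

lemma ofList_nodup {α : Type} [BEq α] [LawfulBEq α] (xs : List α) (h : xs.Nodup) :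
    PySem.Set.ofList xs = xs := by
  simp [pysem, h]

lemma sublist_of_mem_combos : ∀ (xs : List Int) (n : Nat) (c : List Int),
    c ∈ combos xs n → c.Sublist xs := by
  intro xs
  induction xs with
  | nil =>
    intro n c h
    cases n with
    | zero => simp [combos] at h; subst h; simp
    | succ m => simp [combos] at h
  | cons x xs ih =>
    intro n c h
    cases n with
    | zero => simp [combos] at h; subst h; simp
    | succ m =>
      simp only [combos, List.mem_append, List.mem_map] at h
      rcases h with ⟨d, hd, rfl⟩ | h
      · exact (ih m d hd).cons₂ x
      · exact (ih (m + 1) c h).cons x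

lemma nodup_combos : ∀ (xs : List Int), xs.Nodup → ∀ (n : Nat), (combos xs n).Nodup := by
  intro xs
  induction xs with
  | nil =>
    intro _ n
    cases n with
    | zero => simp [combos]
    | succ m => simp [combos]
  | cons x xs ih =>
    intro hnd n
    have hx : x ∉ xs := (List.nodup_cons.mp hnd).1
    have hxs : xs.Nodup := (List.nodup_cons.mp hnd).2
    cases n with
    | zero => simp [combos]
    | succ m =>
      simp only [combos]
      apply List.Nodup.append
      · exact (ih hxs m).map (fun a b h => by injection h)
      · exact ih hxs (m + 1)
      · rw [List.disjoint_left]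
        intro c hc1 hc2
        rcases List.mem_map.mp hc1 with ⟨d, _, rfl⟩
        have : x ∈ xs := (sublist_of_mem_combos xs (m + 1) (x :: d) hc2).subset (by simp)
        exact hx this

lemma length_combos : ∀ (xs : List Int) (n : Nat),
    (combos xs n).length = xs.length.choose n := by
  intro xs
  induction xs with
  | nil =>
    intro n
    cases n with
    | zero => simp [combos]
    | succ m => simp [combos]
  | cons x xs ih =>
    intro n
    cases n with
    | zero => simp [combos]
    | succ m =>
      simp [combos, List.length_append, List.length_map, ih, Nat.choose_succ_succ]

lemma sum_range_choose_succ (n : Nat) :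
    ((List.range n).map (fun j => n.choose (j + 1))).sum = 2 ^ n - 1 := by
  have h := Nat.sum_range_choose n
  rw [Finset.sum_range_succ'] at h
  have hl : ((List.range n).map (fun j => n.choose (j + 1))).sum
      = ∑ j ∈ Finset.range n, n.choose (j + 1) := by
    rw [← List.toFinset_range, List.sum_toFinset _ (List.nodup_range)]
  rw [Nat.choose_zero_right] at h
  omega

-- ===== VERDICT (by name: the statement is the Claim_ definition above) =====
theorem est_subsets_spec : Claim_equal_est_subsets := by
  intro arr _
  unfold Spec_est_subsets est_subsets est_subsets_alt
  have hs : (PySem.Set.ofList arr).Nodup := PySem.Set.nodup_ofList arr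
  set s := PySem.Set.ofList arr with hsdef
  set k := s.length with hk
  have hcast : (((k : Int) + 1) - 1).toNat = k := by omega
  rw [PySem.List.pyRange_one, PySem.List.foldl_add, List.map_map, hcast]
  have hmap : (List.range k).map
      ((fun i : Int => ((PySem.Set.ofList (combos s i.toNat)).length : Int)) ∘ (fun j : Nat => (1 : Int) + j))
      = (List.range k).map (fun j => ((k.choose (j + 1) : Nat) : Int)) := by
    apply List.map_congr_left
    intro j _
    simp only [Function.comp]
    have ht : ((1 : Int) + (j : Int)).toNat = j + 1 := by omega
    rw [ht, ofList_nodup _ (nodup_combos s hs (j + 1)), length_combos]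
  rw [hmap]
  have hnat := sum_range_choose_succ k
  have : ((List.range k).map (fun j => ((k.choose (j + 1) : Nat) : Int))).sum
      = (((List.range k).map (fun j => k.choose (j + 1))).sum : Int) := by
    rw [Nat.cast_list_sum, List.map_map]; rfl
  rw [this, hnat]
  have h1 : 1 ≤ 2 ^ k := Nat.one_le_two_pow
  push_cast [h1]
  ring
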